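-- pv_equiv track=rewrite | github.com/MalliKarjun008/python-coding-challenges | tempCodeRunnerFile.py | fibonacci_pattern
-- ===== SOURCE A (Python) =====
-- def fibonacci_pattern(n):
--     if not isinstance(n,int) or n<=0:
--         raise ValueError("Input must be a positive integer.")
--     pattern=[]
--     a=1
--     b=1
--     for i in range(1,n+1):
--         row=[]
--         for j in range(1,i+1):
--             row.append(str(a))
--             a,b=b,a+b
--         pattern.append(''.join(row))
--     return pattern
-- ===== SOURCE B (Python) =====
-- def fibonacci_pattern(n):
--     if not isinstance(n, int) or n <= 0:
--         raise ValueError("Input must be a positive integer.")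
--     total = n * (n + 1) // 2
--     fibs = []
--     a, b = 1, 1
--     for _ in range(total):
--         fibs.append(str(a))
--         a, b = b, a + b
--     rows = []
--     idx = 0
--     for i in range(1, n + 1):
--         rows.append(''.join(fibs[idx:idx + i]))
--         idx += i
--     return rows
-- ===== Notes on version B (the rewrite author's own statement) =====
-- stated objective: alternative
-- what changed: Replaces A's nested loops (inner loop rebuilding each row while threading the Fibonacci state) by a flat single linear generation of all n*(n+1)/2 Fibonacci strings followed by partitioning that flat list into rows of lengths 1..n via running-index slices.
import Mathlib
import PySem

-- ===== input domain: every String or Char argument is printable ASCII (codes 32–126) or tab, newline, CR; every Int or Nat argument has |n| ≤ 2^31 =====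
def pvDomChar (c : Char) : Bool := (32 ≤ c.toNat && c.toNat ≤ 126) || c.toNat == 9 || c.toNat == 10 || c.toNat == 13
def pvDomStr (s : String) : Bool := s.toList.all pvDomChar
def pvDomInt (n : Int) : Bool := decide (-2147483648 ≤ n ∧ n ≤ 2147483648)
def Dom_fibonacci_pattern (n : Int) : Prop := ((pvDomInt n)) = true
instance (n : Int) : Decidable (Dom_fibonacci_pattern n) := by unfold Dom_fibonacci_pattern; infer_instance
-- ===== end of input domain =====

-- B replaces A's nested row-building loops by one flat linear generation of all
-- n*(n+1)/2 Fibonacci strings and then slices that flat list into rows of lengths 1..n.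

-- ===== PORT A =====
def fibonacci_pattern (n : Int) : List String :=
  -- for i in range(1, n+1): for j in range(1, i+1): row.append(str(a)); a,b = b,a+b
  (((PySem.List.pyRange 1 (n+1) 1).foldl
    (fun (s : List String × Int × Int) x =>
      let inner := (PySem.List.pyRange 1 (x+1) 1).foldl
        (fun (r : List String × Int × Int) _ =>
          (r.1 ++ [PySem.Int.toStr r.2.1], r.2.2, r.2.1 + r.2.2))
        (([] : List String), s.2.1, s.2.2)
      (s.1 ++ [PySem.Str.join "" inner.1], inner.2))
    (([] : List String), (1 : Int), (1 : Int))).1)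

-- ===== PORT B =====
def fibonacci_pattern_alt (n : Int) : List String :=
  let total := PySem.Int.floordiv (n * (n + 1)) 2
  let fibs := (PySem.List.pyRange 0 total 1).foldl
    (fun (r : List String × Int × Int) _ =>
      (r.1 ++ [PySem.Int.toStr r.2.1], r.2.2, r.2.1 + r.2.2))
    (([] : List String), (1 : Int), (1 : Int))
  (((PySem.List.pyRange 1 (n+1) 1).foldl
    (fun (r : List String × Int) i =>
      (r.1 ++ [PySem.Str.join "" (PySem.List.slice fibs.1 (some r.2) (some (r.2 + i)))],
       r.2 + i))
    (([] : List String), (0 : Int))).1)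

-- ===== PRECONDITION & SPEC =====
-- Python A raises ValueError exactly when n <= 0 (non-int inputs are outside the typed domain).
def Pre_fibonacci_pattern (n : Int) : Prop := 1 ≤ n
instance (n : Int) : Decidable (Pre_fibonacci_pattern n) := by unfold Pre_fibonacci_pattern; infer_instance
def pvWitness_fibonacci_pattern : Int := 5

def Spec_fibonacci_pattern (n : Int) (out : List String) : Prop := out = fibonacci_pattern_alt n
instance (n : Int) (out : List String) : Decidable (Spec_fibonacci_pattern n out) := by unfold Spec_fibonacci_pattern; infer_instance

-- ===== CLAIM (what is proved, stated in full; the proofs are below) =====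
def Claim_equal_fibonacci_pattern : Prop := ∀ (n : Int), Dom_fibonacci_pattern n → Pre_fibonacci_pattern n → Spec_fibonacci_pattern n (fibonacci_pattern n)

-- ===== LEMMAS AND PROOFS =====

-- the stream of k Fibonacci strings starting from state (a, b)
def fgen : Nat → Int → Int → List String
  | 0, _, _ => []
  | k+1, a, b => PySem.Int.toStr a :: fgen k b (a + b)

-- the Fibonacci state after k steps
def fadv : Nat → Int × Int → Int × Int
  | 0, p => p
  | k+1, p => fadv k (p.2, p.1 + p.2)

-- rowsA c i p = the c rows of widths i, i+1, …, i+c-1 starting from state p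
def rowsA : Nat → Nat → Int × Int → List String
  | 0, _, _ => []
  | c+1, i, p => PySem.Str.join "" (fgen i p.1 p.2) :: rowsA c (i+1) (fadv i p)

-- total width of c rows of widths i, …, i+c-1
def sumW : Nat → Nat → Nat
  | 0, _ => 0
  | c+1, i => i + sumW c (i+1)

theorem fadv_add (j k : Nat) (p : Int × Int) : fadv (j + k) p = fadv k (fadv j p) := by
  induction j generalizing p with
  | zero => simp [fadv]
  | succ j ih => rw [Nat.succ_add]; simp [fadv, ih]

theorem fgen_take (i m : Nat) (a b : Int) (h : i ≤ m) :
    (fgen m a b).take i = fgen i a b := by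
  induction i generalizing m a b with
  | zero => simp [fgen]
  | succ i ih =>
    cases m with
    | zero => omega
    | succ m => simp [fgen, List.take_succ_cons, ih m b (a + b) (by omega)]

theorem fgen_drop (d m : Nat) (a b : Int) (h : d ≤ m) :
    (fgen m a b).drop d = fgen (m - d) (fadv d (a, b)).1 (fadv d (a, b)).2 := by
  induction d generalizing m a b with
  | zero => simp [fadv]
  | succ d ih =>
    cases m with
    | zero => omega
    | succ m =>
      show (fgen m b (a + b)).drop d = _
      rw [ih m b (a + b) (by omega)]
      simp [fadv]

-- generation loop: the fold appends l.length Fibonacci strings and advances the state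
theorem gen_fold (l : List Int) (acc : List String) (a b : Int) :
    l.foldl (fun (r : List String × Int × Int) _ =>
        (r.1 ++ [PySem.Int.toStr r.2.1], r.2.2, r.2.1 + r.2.2)) (acc, a, b)
    = (acc ++ fgen l.length a b, fadv l.length (a, b)) := by
  induction l generalizing acc a b with
  | nil => simp [fgen, fadv]
  | cons x l ih => simp [List.foldl_cons, ih, fgen, fadv]


-- A's outer loop over i = i0, …, i0+c-1 produces the rows and advances the state by sumW
theorem A_outer (c : Nat) : ∀ (i : Nat) (acc : List String) (p : Int × Int),
    ((PySem.List.pyRange (i:Int) ((i:Int)+(c:Int)) 1).foldl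
      (fun (s : List String × Int × Int) x =>
        (s.1 ++ [PySem.Str.join ""
            ((PySem.List.pyRange 1 (x+1) 1).foldl
              (fun (r : List String × Int × Int) _ =>
                (r.1 ++ [PySem.Int.toStr r.2.1], r.2.2, r.2.1 + r.2.2))
              (([] : List String), s.2.1, s.2.2)).1],
         ((PySem.List.pyRange 1 (x+1) 1).foldl
            (fun (r : List String × Int × Int) _ =>
              (r.1 ++ [PySem.Int.toStr r.2.1], r.2.2, r.2.1 + r.2.2))
            (([] : List String), s.2.1, s.2.2)).2))
      (acc, p))
    = (acc ++ rowsA c i p, fadv (sumW c i) p) := by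
  induction c with
  | zero =>
    intro i acc p
    rw [PySem.List.pyRange_one_eq_nil (by omega)]
    simp [rowsA, sumW, fadv]
  | succ c ih =>
    intro i acc p
    rw [PySem.List.pyRange_one_cons (by push_cast; omega)]
    simp only [List.foldl_cons]
    rw [gen_fold]
    have hlen : (PySem.List.pyRange 1 ((i:Int)+1) 1).length = i := by
      rw [PySem.List.length_pyRange_one]; omega
    rw [hlen]
    have hb : (i:Int) + 1 = ((i+1 : Nat) : Int) := by push_cast; ring
    have hb2 : (i:Int) + ((c+1 : Nat) : Int) = ((i+1 : Nat) : Int) + (c : Int) := by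
      push_cast; ring
    rw [hb, hb2]
    simp only [List.nil_append, Prod.mk.eta]
    rw [ih (i+1)]
    simp [rowsA, sumW, fadv_add]

-- B's partition loop: slicing the flat stream reproduces the rows
theorem B_outer (L : Nat) (c : Nat) : ∀ (i idx : Nat) (acc : List String),
    idx + sumW c i ≤ L →
    ((PySem.List.pyRange (i:Int) ((i:Int)+(c:Int)) 1).foldl
      (fun (r : List String × Int) j =>
        (r.1 ++ [PySem.Str.join ""
            (PySem.List.slice (fgen L 1 1) (some r.2) (some (r.2 + j)))],
         r.2 + j))
      (acc, (idx : Int)))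
    = (acc ++ rowsA c i (fadv idx (1, 1)), ((idx + sumW c i : Nat) : Int)) := by
  induction c with
  | zero =>
    intro i idx acc h
    rw [PySem.List.pyRange_one_eq_nil (by omega)]
    simp [rowsA, sumW]
  | succ c ih =>
    intro i idx acc h
    have hs : sumW (c+1) i = i + sumW c (i+1) := rfl
    rw [PySem.List.pyRange_one_cons (by push_cast; omega)]
    simp only [List.foldl_cons]
    rw [PySem.List.slice_toNat _ (by positivity) (by positivity)]
    have h1 : ((idx : Int)).toNat = idx := by omega
    have h2 : ((idx : Int) + (i : Int)).toNat = idx + i := by omega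
    rw [h1, h2]
    have h3 : idx + i - idx = i := by omega
    rw [h3]
    rw [fgen_drop idx L 1 1 (by omega)]
    rw [fgen_take i (L - idx) _ _ (by omega)]
    have hb : (idx : Int) + (i : Int) = ((idx + i : Nat) : Int) := by push_cast; ring
    have hb2 : (i:Int) + ((c+1 : Nat) : Int) = ((i+1 : Nat) : Int) + (c : Int) := by
      push_cast; ring
    have hb3 : (i:Int) + 1 = ((i+1 : Nat) : Int) := by push_cast; ring
    rw [hb, hb2, hb3]
    rw [ih (i+1) (idx + i) _ (by omega)]
    simp only [rowsA, fadv_add, hs]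
    simp [List.append_assoc, Nat.add_assoc]

theorem two_sumW (c : Nat) : ∀ i, 2 * sumW c (i+1) = c * (c + 2*i + 1) := by
  induction c with
  | zero => intro i; simp [sumW]
  | succ c ih =>
    intro i
    have hs : sumW (c+1) (i+1) = (i+1) + sumW c (i+1+1) := rfl
    rw [hs, Nat.mul_add, ih (i+1)]
    ring

theorem fibonacci_pattern_spec : Claim_equal_fibonacci_pattern := by
  intro n hdom hpre
  unfold Spec_fibonacci_pattern
  have hp1 : (1:Int) ≤ n := hpre
  obtain ⟨m, hm, rfl⟩ : ∃ m : Nat, 1 ≤ m ∧ n = (m:Int) := ⟨n.toNat, by omega, by omega⟩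
  have htot : PySem.Int.floordiv ((m:Int) * (1 + (m:Int))) 2 = ((m*(m+1)/2 : Nat) : Int) := by
    have hc : (m:Int) * (1 + (m:Int)) = ((m*(m+1) : Nat) : Int) := by push_cast; ring
    rw [hc]; exact_mod_cast PySem.Int.floordiv_natCast (m*(m+1)) 2
  have hsum : 2 * sumW m 1 = m*(m+1) := by simpa using two_sumW m 0
  have hlenf : (PySem.List.pyRange 0 ((m*(m+1)/2 : Nat) : Int) 1).length = m*(m+1)/2 := by
    rw [PySem.List.length_pyRange_one]; omega
  have hrange : (m:Int) + 1 = 1 + (m:Int) := by ring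
  have hA := A_outer m 1 [] (1, 1)
  simp only [Nat.cast_one, gen_fold, List.nil_append] at hA
  have hB := B_outer (m*(m+1)/2) m 1 0 [] (by omega)
  simp only [Nat.cast_one, Nat.cast_zero, Nat.zero_add] at hB
  simp only [fibonacci_pattern, fibonacci_pattern_alt, hrange]
  simp only [htot, gen_fold, hlenf, List.nil_append]
  rw [hA, hB]
  simp [fadv]
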